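-- pv_equiv track=rewrite | github.com/kerrlya/opinion-dissemination | data-scraping-trees/tweet_scraper.py | get_full_users_lists
-- ===== SOURCE A (Python) =====
-- def get_full_users_lists(usernames = None, user_ids = None):
--     """Helper to get_full_users_bios. Takes in list of any number of usernames or user_ids. Returns series of 100 term lists with usernames."""
--
--     if usernames != None:
--         usernames = list(dict.fromkeys(usernames)) # get rid of duplicates
--         users = usernames
--     else:
--         user_ids = list(dict.fromkeys(user_ids))
--         users = user_ids
--
--     indices = list(range(len(users)))[::100]
--
--     user_lists = []
--
--     for index in indices:
--         user_list = users[index:(index+100)]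
--         user_lists.append(user_list)
--
--     return user_lists
-- ===== SOURCE B (Python) =====
-- def get_full_users_lists(usernames = None, user_ids = None):
--     """Dedup (first occurrences) and chunk into lists of 100, by a single
--     element-wise pass with a current-chunk accumulator instead of index slicing."""
--     users = dict.fromkeys(usernames if usernames is not None else user_ids)
--     user_lists = []
--     cur = []
--     for u in users:
--         cur.append(u)
--         if len(cur) == 100:
--             user_lists.append(cur)
--             cur = []
--     if cur:
--         user_lists.append(cur)
--     return user_lists
-- ===== Notes on version B (the rewrite author's own statement) =====
-- stated objective: alternative
-- what changed: Replaces the range(len)[::100] index list and repeated slicing with a single element-wise pass that grows a current chunk and flushes it every 100 elements; dedup via dict.fromkeys kept.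
import Mathlib
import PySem

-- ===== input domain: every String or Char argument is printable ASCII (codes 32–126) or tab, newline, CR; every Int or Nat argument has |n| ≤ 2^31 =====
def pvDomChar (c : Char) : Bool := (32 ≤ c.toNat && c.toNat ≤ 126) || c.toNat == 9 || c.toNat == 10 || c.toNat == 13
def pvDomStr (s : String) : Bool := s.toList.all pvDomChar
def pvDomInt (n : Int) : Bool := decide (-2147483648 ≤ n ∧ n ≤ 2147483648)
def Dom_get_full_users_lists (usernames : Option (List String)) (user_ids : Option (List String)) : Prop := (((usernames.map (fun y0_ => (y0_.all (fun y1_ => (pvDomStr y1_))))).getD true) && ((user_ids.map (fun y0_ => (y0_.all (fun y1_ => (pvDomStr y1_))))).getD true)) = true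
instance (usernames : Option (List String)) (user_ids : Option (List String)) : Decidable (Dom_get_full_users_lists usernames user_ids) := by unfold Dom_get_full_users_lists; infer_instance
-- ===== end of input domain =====

-- B replaces A's range(len)[::100] index list + slicing by one element-wise pass with a
-- current-chunk accumulator (same dedup); alternative decomposition, same cost.

-- ===== PORT A =====
-- the shared tail of A after 'users' is chosen: indices = list(range(len(users)))[::100];
-- then the for-loop appending users[index:index+100]
def pvChunkSlices (users : List String) : List (List String) :=
  let indices := (PySem.List.slice? (PySem.List.pyRange 0 (users.length : Int) 1) none none 100).getD []
  indices.foldl (fun acc index => acc ++ [PySem.List.slice users (some index) (some (index + 100))]) []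

-- A raises TypeError when both arguments are None (dict.fromkeys(None)); that case is outside Pre_
def get_full_users_lists (usernames : Option (List String)) (user_ids : Option (List String)) : List (List String) :=
  match usernames with
  | some us => pvChunkSlices (PySem.List.dedup us)
  | none =>
    match user_ids with
    | some ids => pvChunkSlices (PySem.List.dedup ids)
    | none => []   -- unreachable under Pre_ (Python raises TypeError here)

-- ===== PORT B =====
-- Source B's loop body: append u to cur, flush cur into user_lists when it reaches 100
def pvChunkStep (st : List (List String) × List String) (u : String) : List (List String) × List String :=
  let cur := st.2 ++ [u]
  if cur.length = 100 then (st.1 ++ [cur], []) else (st.1, cur)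

def pvChunkAccum (users : List String) : List (List String) :=
  let st := users.foldl pvChunkStep ([], [])
  if st.2 ≠ [] then st.1 ++ [st.2] else st.1

def get_full_users_lists_alt (usernames : Option (List String)) (user_ids : Option (List String)) : List (List String) :=
  match (match usernames with | some us => some us | none => user_ids) with
  | some seq => pvChunkAccum (PySem.List.dedup seq)
  | none => []   -- unreachable under Pre_ (Python raises TypeError here)

-- ===== PRECONDITION & SPEC =====
-- Pre_ excludes only the both-None input, on which both A and B raise TypeError (dict.fromkeys(None))
def Pre_get_full_users_lists (usernames : Option (List String)) (user_ids : Option (List String)) : Prop :=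
  usernames ≠ none ∨ user_ids ≠ none
instance (usernames : Option (List String)) (user_ids : Option (List String)) : Decidable (Pre_get_full_users_lists usernames user_ids) := by unfold Pre_get_full_users_lists; infer_instance
def pvWitness_get_full_users_lists : Option (List String) × Option (List String) := (some ["a", "b", "a"], none)

def Spec_get_full_users_lists (usernames : Option (List String)) (user_ids : Option (List String)) (out : List (List String)) : Prop := out = get_full_users_lists_alt usernames user_ids
instance (usernames : Option (List String)) (user_ids : Option (List String)) (out : List (List String)) : Decidable (Spec_get_full_users_lists usernames user_ids out) := by unfold Spec_get_full_users_lists; infer_instance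

-- ===== CLAIM (what is proved, stated in full; the proofs are below) =====
def Claim_equal_get_full_users_lists : Prop := ∀ (usernames : Option (List String)) (user_ids : Option (List String)), Dom_get_full_users_lists usernames user_ids → Pre_get_full_users_lists usernames user_ids → Spec_get_full_users_lists usernames user_ids (get_full_users_lists usernames user_ids)

-- ===== LEMMAS AND PROOFS =====

-- reference chunking: first 100 elements, then the chunks of the rest
def pvSpecChunk : List String → List (List String)
  | [] => []
  | x :: xs => (x :: xs).take 100 :: pvSpecChunk (xs.drop 99)
termination_by l => l.length
decreasing_by simp

theorem pvIndices_eq (n : Nat) :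
    (PySem.List.slice? (PySem.List.pyRange 0 (n:Int) 1) none none 100).getD []
      = (List.range ((n+99)/100)).map (fun k : Nat => ((100 : Int) * (k : Int))) := by
  unfold PySem.List.slice? PySem.List.sliceIndices
  simp only [if_neg (by norm_num : ¬ (100:Int) = 0)]
  norm_num
  have hcnt : (if 0 < n then (((n:Int) + 100 - 1) / 100).toNat else 0) = (n+99)/100 := by
    split <;> omega
  rw [hcnt]
  rw [List.filterMap_congr (g := fun x : Nat => some ((100:Int) * x))
      (by intro x hx; simp at hx; rw [if_pos]; omega)]
  rw [show (fun x : Nat => some ((100:Int) * x)) = some ∘ (fun k : Nat => ((100:Int) * k)) from rfl,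
      List.filterMap_eq_map]

theorem pvSpecChunk_short (cur : List String) (h : cur.length < 100) :
    pvSpecChunk cur = if cur = [] then [] else [cur] := by
  cases cur with
  | nil => simp [pvSpecChunk]
  | cons x xs =>
    rw [pvSpecChunk]
    simp at h
    rw [List.drop_eq_nil_of_le (by omega), List.take_of_length_le (by simp; omega)]
    simp [pvSpecChunk]

theorem pvSpecChunk_full (cur : List String) (us : List String) (h : cur.length = 100) :
    pvSpecChunk (cur ++ us) = cur :: pvSpecChunk us := by
  cases cur with
  | nil => simp at h
  | cons x xs =>
    simp at h
    rw [show (x :: xs) ++ us = x :: (xs ++ us) from rfl, pvSpecChunk]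
    congr 1
    · show x :: (xs ++ us).take 99 = x :: xs
      rw [List.take_left' h]
    · rw [List.drop_left' h]

theorem pvFoldl_chunkStep (us : List String) : ∀ (acc : List (List String)) (cur : List String), cur.length < 100 →
    (let st := us.foldl pvChunkStep (acc, cur)
     if st.2 ≠ [] then st.1 ++ [st.2] else st.1) = acc ++ pvSpecChunk (cur ++ us) := by
  induction us with
  | nil =>
    intro acc cur h
    simp [pvSpecChunk_short cur h]
    split <;> simp_all
  | cons u us ih =>
    intro acc cur h
    simp only [List.foldl_cons]
    show (let st := us.foldl pvChunkStep (pvChunkStep (acc, cur) u); _) = _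
    rw [pvChunkStep]
    simp only []
    by_cases hf : (cur ++ [u]).length = 100
    · rw [if_pos hf]
      rw [ih (acc ++ [cur ++ [u]]) [] (by simp)]
      have : cur ++ u :: us = (cur ++ [u]) ++ us := by simp
      rw [this, pvSpecChunk_full _ _ hf]
      simp
    · rw [if_neg hf]
      rw [ih acc (cur ++ [u]) (by simp at hf ⊢; omega)]
      simp

theorem pvMapChunks (us : List String) :
    (List.range ((us.length+99)/100)).map (fun k => (us.drop (100*k)).take 100) = pvSpecChunk us := by
  fun_induction pvSpecChunk us with
  | case1 => simp
  | case2 x xs ih =>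
    have hcnt : ((x :: xs).length + 99)/100 = ((xs.drop 99).length + 99)/100 + 1 := by
      simp; omega
    rw [hcnt, List.range_succ_eq_map, List.map_cons, List.map_map]
    refine List.cons_eq_cons.mpr ⟨by simp, ?_⟩
    rw [← ih]
    apply List.map_congr_left
    intro k hk
    simp only [Function.comp]
    congr 1
    rw [List.drop_drop]
    rw [show 100 * Nat.succ k = (99 + 100 * k) + 1 from by omega]
    rw [List.drop_succ_cons]

theorem pvChunkSlices_eq (us : List String) : pvChunkSlices us = pvSpecChunk us := by
  unfold pvChunkSlices
  rw [pvIndices_eq]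
  simp only [PySem.List.foldl_append_singleton_eq_map, List.nil_append, List.map_map]
  rw [← pvMapChunks]
  apply List.map_congr_left
  intro k hk
  simp only [Function.comp]
  rw [show ((100:Int)*(k:Int) + 100) = ((100*k + 100 : Nat) : Int) from by push_cast; ring,
      show ((100:Int)*(k:Int)) = ((100*k : Nat):Int) from by push_cast; ring,
      PySem.List.slice_natCast]
  congr 1
  omega

theorem pvChunkAccum_eq (us : List String) : pvChunkAccum us = pvSpecChunk us := by
  unfold pvChunkAccum
  simpa using pvFoldl_chunkStep us [] [] (by simp)

-- ===== VERDICT (by name: the statement is the Claim_ definition above) =====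
theorem get_full_users_lists_spec : Claim_equal_get_full_users_lists := by
  intro usernames user_ids _ hpre
  unfold Spec_get_full_users_lists get_full_users_lists get_full_users_lists_alt
  cases usernames with
  | some us => simp [pvChunkSlices_eq, pvChunkAccum_eq]
  | none =>
    cases user_ids with
    | some ids => simp [pvChunkSlices_eq, pvChunkAccum_eq]
    | none => simp [Pre_get_full_users_lists] at hpre
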